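-- pv_equiv track=rewrite | github.com/talestormark/NINA_fordypningsoppgave | scripts/data_validation/02_extract_refids.py | find_common_refids
-- ===== SOURCE A (Python) =====
-- def find_common_refids(refid_dict):
--     """
--     Find intersection of REFIDs across all folders
--
--     Args:
--         refid_dict: Dictionary of {folder_name: set_of_refids}
--
--     Returns:
--         Sorted list of common REFIDs
--     """
--     if not refid_dict:
--         return []
--
--     # Start with first set
--     common_refids = None
--     for refids in refid_dict.values():
--         if common_refids is None:
--             common_refids = refids.copy()
--         else:
--             common_refids = common_refids.intersection(refids)
--
--     return sorted(list(common_refids))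
-- ===== SOURCE B (Python) =====
-- def find_common_refids(refid_dict):
--     if not refid_dict:
--         return []
--     counts = {}
--     for refids in refid_dict.values():
--         for r in refids:
--             counts[r] = counts.get(r, 0) + 1
--     n = len(refid_dict)
--     return sorted(r for r, c in counts.items() if c == n)
-- ===== Notes on version B (the rewrite author's own statement) =====
-- stated objective: alternative
-- what changed: B replaces A's running fold of set.intersection across the folder sets by a single tally pass: it counts, in one dict, how many folders contain each refid, then keeps exactly the refids whose count equals the number of folders and sorts them.
import Mathlib
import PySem

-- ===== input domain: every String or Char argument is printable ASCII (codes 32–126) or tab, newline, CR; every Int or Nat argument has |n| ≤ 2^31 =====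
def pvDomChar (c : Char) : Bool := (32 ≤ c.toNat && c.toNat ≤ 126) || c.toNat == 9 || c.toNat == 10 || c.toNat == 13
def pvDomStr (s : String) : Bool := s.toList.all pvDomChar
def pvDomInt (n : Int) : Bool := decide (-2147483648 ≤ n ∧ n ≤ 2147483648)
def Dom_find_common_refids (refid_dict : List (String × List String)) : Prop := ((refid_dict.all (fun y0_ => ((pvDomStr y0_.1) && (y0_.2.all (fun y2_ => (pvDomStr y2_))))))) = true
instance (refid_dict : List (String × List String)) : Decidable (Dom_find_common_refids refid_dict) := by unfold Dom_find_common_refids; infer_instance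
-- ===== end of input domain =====

-- B replaces A's fold of set.intersection over the folder sets by a single tally pass
-- (count per refid, then keep those whose count equals the number of folders); objective: alternative.


-- ===== PORT A =====
-- the body of A's loop: if common_refids is None take a copy, else intersect
def stepA (acc : Option (PySem.Set String)) (refids : PySem.Set String) : Option (PySem.Set String) :=
  match acc with
  | none => some refids                              -- refids.copy()
  | some c => some (PySem.Set.inter c refids)        -- common_refids.intersection(refids)

def find_common_refids (refid_dict : List (String × List String)) : List String :=
  if refid_dict.isEmpty then []
  else
    -- common_refids = None; for refids in refid_dict.values(): …
    let common : Option (PySem.Set String) :=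
      (refid_dict.map (fun kv => kv.2)).foldl stepA none
    -- return sorted(list(common_refids))  (common is some _ here: the dict is nonempty)
    PySem.List.sorted (common.getD []) (fun x => x) false

-- ===== PORT B =====
def find_common_refids_alt (refid_dict : List (String × List String)) : List String :=
  if refid_dict.isEmpty then []
  else
    -- counts = {}; for refids in refid_dict.values(): for r in refids: counts[r] = counts.get(r, 0) + 1
    let counts : PySem.Dict String Int :=
      (refid_dict.map (fun kv => kv.2)).foldl
        (fun d refids => refids.foldl (fun d r => d.insert r (d.getD r 0 + 1)) d)
        PySem.Dict.empty
    let n : Int := (refid_dict.length : Int)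
    -- return sorted(r for r, c in counts.items() if c == n)
    PySem.List.sorted ((counts.items.filter (fun p => p.2 == n)).map (fun p => p.1)) (fun x => x) false

-- ===== PRECONDITION & SPEC =====
-- Pre_ is the representation invariant of the Python argument type dict[str, set[str]]: an association
-- list with a duplicate key or a duplicate element inside a value list does not denote any dict of sets
-- (Python collapses the duplicates before A ever runs), so those lists are excluded.
def Pre_find_common_refids (refid_dict : List (String × List String)) : Prop :=
  (refid_dict.map (fun kv => kv.1)).Nodup ∧ ∀ p ∈ refid_dict, p.2.Nodup
instance (refid_dict : List (String × List String)) : Decidable (Pre_find_common_refids refid_dict) := by unfold Pre_find_common_refids; infer_instance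

def pvWitness_find_common_refids : (List (String × List String)) :=
  [("a", ["x", "y"]), ("b", ["y", "x", "z"])]

def Spec_find_common_refids (refid_dict : List (String × List String)) (out : List String) : Prop := out = find_common_refids_alt refid_dict
instance (refid_dict : List (String × List String)) (out : List String) : Decidable (Spec_find_common_refids refid_dict out) := by unfold Spec_find_common_refids; infer_instance

-- ===== CLAIM (what is proved, stated in full; the proofs are below) =====
def Claim_equal_find_common_refids : Prop := ∀ (refid_dict : List (String × List String)), Dom_find_common_refids refid_dict → Pre_find_common_refids refid_dict → Spec_find_common_refids refid_dict (find_common_refids refid_dict)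

-- ===== LEMMAS AND PROOFS =====

-- A's loop, once started, is a fold of intersections over the remaining sets.
lemma foldA_some (ls : List (List String)) (c : PySem.Set String) :
    ls.foldl stepA (some c) = some (ls.foldl (fun c l => PySem.Set.inter c l) c) := by
  induction ls generalizing c with
  | nil => rfl
  | cons l ls ih => simp [List.foldl, stepA, ih]

lemma mem_foldA (ls : List (List String)) (c : PySem.Set String) (x : String) :
    x ∈ ls.foldl (fun c l => PySem.Set.inter c l) c ↔ x ∈ c ∧ ∀ l ∈ ls, x ∈ l := by
  induction ls generalizing c with
  | nil => simp
  | cons l ls ih =>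
    simp [List.foldl, ih, PySem.Set.mem_inter]
    tauto

lemma nodup_foldA (ls : List (List String)) (c : PySem.Set String) (hc : c.Nodup) :
    (ls.foldl (fun c l => PySem.Set.inter c l) c).Nodup := by
  induction ls generalizing c with
  | nil => exact hc
  | cons l ls ih => exact ih _ (PySem.Set.nodup_inter _ _ hc)

-- B's tally: value of the counter at x is the total number of occurrences of x in the sets.
lemma getD_foldB (vals : List (List String)) (d : PySem.Dict String Int) (x : String) :
    ((vals.foldl (fun d refids => refids.foldl (fun d r => d.insert r (d.getD r 0 + 1)) d) d).getD x 0)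
      = d.getD x 0 + ((vals.map (fun l => l.count x)).sum : Int) := by
  induction vals generalizing d with
  | nil => simp
  | cons l vs ih =>
    simp [List.foldl, ih, PySem.Dict.getD_foldl_insert_add_one]
    ring

lemma nodup_keys_foldB (vals : List (List String)) (d : PySem.Dict String Int) (hd : d.keys.Nodup) :
    ((vals.foldl (fun d refids => refids.foldl (fun d r => d.insert r (d.getD r 0 + 1)) d) d).keys).Nodup := by
  induction vals generalizing d with
  | nil => exact hd
  | cons l vs ih => exact ih _ (PySem.Dict.nodup_keys_foldl_insert l _ d hd)

lemma cast_sum_counts (vals : List (List String)) (x : String) :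
    (vals.map (fun l => ((l.count x : ℕ) : ℤ))).sum = (((vals.map (fun l => l.count x)).sum : ℕ) : ℤ) := by
  induction vals with
  | nil => rfl
  | cons l vs ih =>
    simp only [List.map_cons, List.sum_cons, ih]
    push_cast
    ring

-- A sum of per-set counts, each set duplicate-free, reaches the number of sets iff x lies in every set.
lemma sum_counts_le (vals : List (List String)) (x : String) (h : ∀ l ∈ vals, l.Nodup) :
    (vals.map (fun l => l.count x)).sum ≤ vals.length := by
  induction vals with
  | nil => simp
  | cons l vs ih =>
    have h1 : l.count x ≤ 1 := List.nodup_iff_count_le_one.mp (h l (by simp)) x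
    have h2 := ih (fun l hl => h l (by simp [hl]))
    simp only [List.map_cons, List.sum_cons, List.length_cons]
    omega

lemma sum_counts_eq_iff (vals : List (List String)) (x : String) (h : ∀ l ∈ vals, l.Nodup) :
    (vals.map (fun l => l.count x)).sum = vals.length ↔ ∀ l ∈ vals, x ∈ l := by
  induction vals with
  | nil => simp
  | cons l vs ih =>
    have h1 : l.count x ≤ 1 := List.nodup_iff_count_le_one.mp (h l (by simp)) x
    have h2 := sum_counts_le vs x (fun l hl => h l (by simp [hl]))
    have h3 := ih (fun l hl => h l (by simp [hl]))
    have hmem : x ∈ l ↔ 0 < l.count x := List.count_pos_iff.symm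
    simp only [List.map_cons, List.sum_cons, List.length_cons, List.mem_cons]
    constructor
    · intro he
      have hc1 : l.count x = 1 := by omega
      have hs : (vs.map (fun l => l.count x)).sum = vs.length := by omega
      exact fun l' hl' => hl'.elim (fun e => e ▸ hmem.mpr (by omega)) (h3.mp hs l')
    · intro hall
      have hx : 0 < l.count x := hmem.mp (hall l (Or.inl rfl))
      have hs : (vs.map (fun l => l.count x)).sum = vs.length :=
        h3.mpr (fun l' hl' => hall l' (Or.inr hl'))
      omega

-- ===== VERDICT (by name: the statement is the Claim_ definition above) =====
theorem find_common_refids_spec : Claim_equal_find_common_refids := by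
  intro refid_dict _ hpre
  unfold Spec_find_common_refids
  unfold find_common_refids find_common_refids_alt
  rcases refid_dict with _ | ⟨⟨k0, v0⟩, rest⟩
  · rfl
  · simp only [List.isEmpty_cons, Bool.false_eq_true, if_false]
    set rd := ((k0, v0) :: rest : List (String × List String)) with hrd
    set vals := rd.map (fun kv => kv.2) with hvals
    have hvnd : ∀ l ∈ vals, l.Nodup := by
      intro l hl
      rcases List.mem_map.mp hl with ⟨p, hp, he⟩
      exact he ▸ hpre.2 p hp
    have hA : ((vals.foldl stepA none).getD [])
        = (List.map (fun kv => kv.2) rest).foldl (fun c l => PySem.Set.inter c l) v0 := by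
      simp only [hvals, hrd, List.map_cons, List.foldl_cons]
      rw [show stepA none v0 = some v0 from rfl, foldA_some]
      rfl
    set La := (List.map (fun kv => kv.2) rest).foldl (fun c l => PySem.Set.inter c l) v0 with hLa
    set counts : PySem.Dict String Int :=
      (vals.foldl (fun d refids => refids.foldl (fun d r => d.insert r (d.getD r 0 + 1)) d)
        PySem.Dict.empty) with hcounts
    set Lb := ((counts.items.filter (fun p => p.2 == (rd.length : Int))).map (fun p => p.1)) with hLb
    rw [hA]
    -- both pre-sort lists are duplicate-free
    have hndA : La.Nodup := nodup_foldA _ _ (hvnd v0 (List.mem_map.mpr ⟨(k0, v0), List.mem_cons_self, rfl⟩))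
    have hkeysnd : counts.keys.Nodup :=
      nodup_keys_foldB vals PySem.Dict.empty PySem.Dict.nodup_keys_empty
    have hndB : Lb.Nodup := by
      have hsub : (counts.items.filter (fun p => p.2 == (rd.length : Int))).Sublist counts.items :=
        List.filter_sublist
      exact hkeysnd.sublist (by simpa [hLb, PySem.Dict.keys] using hsub.map (fun p : String × Int => p.1))
    have hlen : vals.length = rd.length := by simp [hvals]
    -- membership in B's list means: the counter maps x to the number of folders
    have hmemB : ∀ x, x ∈ Lb ↔ (x, (rd.length : Int)) ∈ counts.items := by
      intro x
      simp only [hLb, List.mem_map, List.mem_filter]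
      constructor
      · rintro ⟨⟨k, v⟩, ⟨hin, hv⟩, rfl⟩
        have : v = (rd.length : Int) := by simpa using hv
        exact this ▸ hin
      · intro hin
        exact ⟨(x, (rd.length : Int)), ⟨hin, by simp⟩, rfl⟩
    have hgetD : ∀ x, counts.getD x 0 = (((vals.map (fun l => l.count x)).sum : ℕ) : Int) := by
      intro x
      rw [hcounts, getD_foldB]
      simp only [PySem.Dict.getD_empty, zero_add]
      exact cast_sum_counts vals x
    -- the two lists have the same members
    have hmem : ∀ x, x ∈ La ↔ x ∈ Lb := by
      intro x
      rw [hLa, mem_foldA, hmemB x]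
      constructor
      · rintro ⟨hx0, hxs⟩
        have hall : ∀ l ∈ vals, x ∈ l := by
          intro l hl
          rcases List.mem_map.mp hl with ⟨p, hp, he⟩
          rcases List.mem_cons.mp hp with h | h
          · rw [← he, h]; exact hx0
          · exact he ▸ hxs p.2 (List.mem_map.mpr ⟨p, h, rfl⟩)
        have hsum := (sum_counts_eq_iff vals x hvnd).mpr hall
        have hv : counts.getD x 0 = (rd.length : Int) := by
          rw [hgetD x, hsum, hlen]
        cases hget : counts.get? x with
        | none =>
          exfalso
          have h0 : counts.getD x 0 = 0 := by
            rw [PySem.Dict.getD_eq_get?_getD, hget]; rfl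
          rw [hv] at h0
          have hpos : 0 < rd.length := by rw [hrd]; simp
          omega
        | some v =>
          have hveq : v = (rd.length : Int) := by
            have h2 : counts.getD x 0 = v := by
              rw [PySem.Dict.getD_eq_get?_getD, hget]; rfl
            rw [hv] at h2
            exact h2.symm
          rw [hveq] at hget
          exact PySem.Dict.mem_items_of_get?_eq_some counts hget
      · intro hin
        have hget : counts.getD x 0 = (rd.length : Int) :=
          PySem.Dict.getD_of_mem_items counts hin hkeysnd 0
        have hsum : (vals.map (fun l => l.count x)).sum = vals.length := by
          rw [hgetD x] at hget
          have h2 : ((rd.length : ℕ) : ℤ) = ((vals.length : ℕ) : ℤ) := by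
            exact_mod_cast hlen.symm
          exact_mod_cast hget.trans h2
        have hall := (sum_counts_eq_iff vals x hvnd).mp hsum
        refine ⟨hall v0 (List.mem_map.mpr ⟨(k0, v0), List.mem_cons_self, rfl⟩), fun l hl => ?_⟩
        rcases List.mem_map.mp hl with ⟨p, hp, he⟩
        exact hall l (List.mem_map.mpr ⟨p, List.mem_cons_of_mem _ hp, he⟩)
    -- hence they are permutations, and sorting with the injective identity key agrees
    have hperm : La.Perm Lb := (List.perm_ext_iff_of_nodup hndA hndB).mpr hmem
    exact PySem.List.sorted_eq_sorted_of_perm _ _ _ (fun a b h => h) hperm
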